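-- pv_equiv track=rewrite | github.com/Desserg/Timus-Online-Judge | 2025 Стенка на стенку.py | hard
-- ===== SOURCE A (Python) =====
-- def hard(n, k):
--     if n%k == 0:
--         return n**2*(k-1)//(2*k)
--     else:
--         k1 = n%k  # команд членов на 1 больше
--         k2 = k - k1
--         n2 = n//k * k2 # членов команд на 1 меньше где
--         n1 = n - n2
--         return hard(n1, k1) + hard(n2, k2) + n1*n2
-- ===== SOURCE B (Python) =====
-- def hard(n, k):
--     q, r = divmod(n, k)
--     within = r * (q + 1) * q // 2 + (k - r) * q * (q - 1) // 2
--     return n * (n - 1) // 2 - within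
-- ===== Notes on version B (the rewrite author's own statement) =====
-- stated objective: simpler
-- what changed: Replaced A's recursive split into even/odd-size team groups by a direct closed form: total pairs C(n,2) minus within-team pairs computed from divmod(n,k).
import Mathlib
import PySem

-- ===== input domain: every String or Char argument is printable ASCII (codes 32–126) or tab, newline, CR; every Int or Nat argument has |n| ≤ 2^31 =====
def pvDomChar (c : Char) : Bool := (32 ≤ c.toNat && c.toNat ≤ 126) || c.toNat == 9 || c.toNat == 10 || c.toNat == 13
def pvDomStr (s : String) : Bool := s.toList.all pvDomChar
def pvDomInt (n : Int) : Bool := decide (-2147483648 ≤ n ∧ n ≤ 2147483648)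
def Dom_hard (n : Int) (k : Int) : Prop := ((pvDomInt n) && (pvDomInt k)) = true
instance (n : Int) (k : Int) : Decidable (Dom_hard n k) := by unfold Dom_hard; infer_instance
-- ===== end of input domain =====

-- B replaces A's recursive even/odd-team split by the closed form C(n,2) minus within-team pairs (simpler; return value only).


-- ===== PORT A =====
-- termination helpers cited by the port's decreasing_by: both recursive calls satisfy mod = 0,
-- so they hit the base branch (measure 1 → 0)
theorem pv_mod_n1 (n k : Int) :
    PySem.Int.mod (n - PySem.Int.floordiv n k * (k - PySem.Int.mod n k)) (PySem.Int.mod n k) = 0 := by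
  have h : k * (n.fdiv k) + n.fmod k = n := Int.mul_fdiv_add_fmod n k
  have e : n - PySem.Int.floordiv n k * (k - PySem.Int.mod n k)
      = (n.fdiv k + 1) * (n.fmod k) := by
    simp only [PySem.Int.floordiv, PySem.Int.mod]; linarith [h]
  simp only [PySem.Int.mod] at *
  rw [e]; exact Int.mul_fmod_left _ _

theorem pv_mod_n2 (n k : Int) :
    PySem.Int.mod (PySem.Int.floordiv n k * (k - PySem.Int.mod n k)) (k - PySem.Int.mod n k) = 0 := by
  simp only [PySem.Int.floordiv, PySem.Int.mod]
  exact Int.mul_fmod_left _ _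

def hard (n : Int) (k : Int) : Int :=
  if PySem.Int.mod n k = 0 then
    PySem.Int.floordiv (n ^ 2 * (k - 1)) (2 * k)
  else
    let k1 := PySem.Int.mod n k
    let k2 := k - k1
    let n2 := PySem.Int.floordiv n k * k2
    let n1 := n - n2
    hard n1 k1 + hard n2 k2 + n1 * n2
termination_by (if PySem.Int.mod n k = 0 then (0 : Nat) else 1)
decreasing_by
  · have h : ¬ PySem.Int.mod n k = 0 := by assumption
    rw [if_pos (pv_mod_n1 n k), if_neg h]; omega
  · have h : ¬ PySem.Int.mod n k = 0 := by assumption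
    rw [if_pos (pv_mod_n2 n k), if_neg h]; omega

-- ===== PORT B =====
def hard_alt (n : Int) (k : Int) : Int :=
  let q := PySem.Int.floordiv n k
  let r := PySem.Int.mod n k
  let within := PySem.Int.floordiv (r * (q + 1) * q) 2
      + PySem.Int.floordiv ((k - r) * q * (q - 1)) 2
  PySem.Int.floordiv (n * (n - 1)) 2 - within

-- ===== PRECONDITION & SPEC =====
-- Pre_ excludes exactly k = 0, where Python A raises ZeroDivisionError (B raises there too).
def Pre_hard (n : Int) (k : Int) : Prop := k ≠ 0
instance (n : Int) (k : Int) : Decidable (Pre_hard n k) := by unfold Pre_hard; infer_instance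
def pvWitness_hard : Int × Int := (10, 3)
def Spec_hard (n : Int) (k : Int) (out : Int) : Prop := out = hard_alt n k
instance (n : Int) (k : Int) (out : Int) : Decidable (Spec_hard n k out) := by unfold Spec_hard; infer_instance

-- ===== CLAIM (what is proved, stated in full; the proofs are below) =====
def Claim_equal_hard : Prop := ∀ (n : Int) (k : Int), Dom_hard n k → Pre_hard n k → Spec_hard n k (hard n k)

-- ===== LEMMAS AND PROOFS =====

-- exact floor division by 2 of an even number
theorem pv_fdiv_two (t : Int) : PySem.Int.floordiv (2 * t) 2 = t := by
  simp only [PySem.Int.floordiv]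
  exact Int.mul_fdiv_cancel_left t (by norm_num)

-- A's base branch, doubled: for n = q*k, 2 * (n^2*(k-1) // (2*k)) = q^2*(k-1)*k (the division is exact)
theorem pv_base2 (q k : Int) (hk : k ≠ 0) :
    2 * PySem.Int.floordiv ((q * k) ^ 2 * (k - 1)) (2 * k) = q ^ 2 * (k - 1) * k := by
  obtain ⟨m, hm⟩ := Int.even_mul_succ_self (k - 1)
  have hm' : (k - 1) * k = m + m := by linear_combination hm
  have e : (q * k) ^ 2 * (k - 1) = (2 * k) * (q ^ 2 * m) := by linear_combination (q ^ 2 * k) * hm'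
  simp only [PySem.Int.floordiv]
  rw [e, Int.mul_fdiv_cancel_left _ (by intro h; exact hk (by omega))]
  linear_combination (-q ^ 2) * hm'

-- B doubled: all three // 2 divisions are exact, so 2*B is the plain polynomial
theorem pv_alt2 (n k : Int) :
    2 * hard_alt n k
      = n * (n - 1)
        - ((PySem.Int.mod n k) * (PySem.Int.floordiv n k + 1) * (PySem.Int.floordiv n k)
           + (k - PySem.Int.mod n k) * (PySem.Int.floordiv n k) * (PySem.Int.floordiv n k - 1)) := by
  set q := PySem.Int.floordiv n k
  set r := PySem.Int.mod n k
  obtain ⟨t1, ht1⟩ := Int.even_mul_succ_self (n - 1)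
  obtain ⟨t2, ht2⟩ := Int.even_mul_succ_self (q - 1)
  obtain ⟨t3, ht3⟩ := Int.even_mul_succ_self q
  have e1 : n * (n - 1) = 2 * t1 := by linear_combination ht1
  have e2 : r * (q + 1) * q = 2 * (r * t3) := by linear_combination r * ht3
  have e3 : (k - r) * q * (q - 1) = 2 * ((k - r) * t2) := by linear_combination (k - r) * ht2
  simp only [hard_alt]
  rw [e1, e2, e3, pv_fdiv_two, pv_fdiv_two, pv_fdiv_two]
  ring

-- mod's value lies strictly on the divisor's side of 0, so k - (n % k) ≠ 0 when n % k ≠ 0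
theorem pv_k2_ne (n k : Int) (hk : k ≠ 0) :
    k - PySem.Int.mod n k ≠ 0 := by
  rcases lt_or_gt_of_ne hk with hneg | hpos
  · have := PySem.Int.mod_neg_bounds n hneg
    omega
  · have h1 := PySem.Int.mod_nonneg n hpos
    have h2 := PySem.Int.mod_lt n hpos
    omega

-- A doubled, base branch
theorem pv_A2_base (n k : Int) (hk : k ≠ 0) (h : PySem.Int.mod n k = 0) :
    2 * hard n k
      = n * (n - 1)
        - ((PySem.Int.mod n k) * (PySem.Int.floordiv n k + 1) * (PySem.Int.floordiv n k)
           + (k - PySem.Int.mod n k) * (PySem.Int.floordiv n k) * (PySem.Int.floordiv n k - 1)) := by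
  have hn : k * (n.fdiv k) + n.fmod k = n := Int.mul_fdiv_add_fmod n k
  rw [hard, if_pos h]
  set q := PySem.Int.floordiv n k with hq
  set r := PySem.Int.mod n k with hr
  have hr0 : r = 0 := h
  have hnq : n = q * k := by
    simp only [hq, hr, PySem.Int.floordiv, PySem.Int.mod] at *; linarith [hn]
  rw [show n ^ 2 * (k - 1) = (q * k) ^ 2 * (k - 1) by rw [← hnq]]
  rw [pv_base2 q k hk, hnq, hr0]
  ring

-- A doubled, recursive branch: both calls hit the base branch, then it is algebra
theorem pv_A2_rec (n k : Int) (hk : k ≠ 0) (h : ¬ PySem.Int.mod n k = 0) :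
    2 * hard n k
      = n * (n - 1)
        - ((PySem.Int.mod n k) * (PySem.Int.floordiv n k + 1) * (PySem.Int.floordiv n k)
           + (k - PySem.Int.mod n k) * (PySem.Int.floordiv n k) * (PySem.Int.floordiv n k - 1)) := by
  have hn : k * (n.fdiv k) + n.fmod k = n := Int.mul_fdiv_add_fmod n k
  have hk2 : k - PySem.Int.mod n k ≠ 0 := pv_k2_ne n k hk
  rw [hard, if_neg h]
  simp only []
  rw [hard, if_pos (pv_mod_n1 n k)]
  rw [hard, if_pos (pv_mod_n2 n k)]
  set q := PySem.Int.floordiv n k with hq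
  set r := PySem.Int.mod n k with hr
  have en1 : n - q * (k - r) = (q + 1) * r := by
    simp only [hq, hr, PySem.Int.floordiv, PySem.Int.mod]; linarith [hn]
  rw [en1]
  have b1 := pv_base2 (q + 1) r h
  have b2 := pv_base2 q (k - r) hk2
  rw [show n = k * q + r by simp only [hq, hr, PySem.Int.floordiv, PySem.Int.mod]; linarith [hn]]
  linear_combination b1 + b2

-- ===== VERDICT (by name: the statement is the Claim_ definition above) =====
theorem hard_spec : Claim_equal_hard := by
  intro n k _ hk
  unfold Spec_hard
  have hB := pv_alt2 n k
  by_cases h : PySem.Int.mod n k = 0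
  · have hA := pv_A2_base n k hk h
    omega
  · have hA := pv_A2_rec n k hk h
    omega
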